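-- pv_equiv track=rewrite | github.com/pherdinauer/ANACD2 | json_downloader/utils.py | find_duplicate_links
-- ===== SOURCE A (Python) =====
-- def normalize_url_for_comparison(url):
--     """
--     Normalizza un URL per confronto, eliminando differenze non significative come:
--     - http vs https
--     - presenza o assenza di slash finale
--     - normalizzazione di caratteri maiuscoli/minuscoli
--     """
--     # Converte in minuscolo
--     url = url.lower()
--
--     # Rimuovi protocollo (http/https)
--     if url.startswith('http://'):
--         url = url[7:]
--     elif url.startswith('https://'):
--         url = url[8:]
--
--     # Rimuovi slash finale
--     url = url.rstrip('/')
--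
--     # Rimuovi parametri query se non significativi
--     if '?' in url and not any(x in url for x in ['format=', 'download=', 'file=']):
--         url = url.split('?')[0]
--
--     return url
--
-- def find_duplicate_links(links):
--     """
--     Identifica link duplicati che puntano alla stessa risorsa ma hanno URL diverse.
--     Restituisce un dizionario dove le chiavi sono gli URL canonici e i valori sono liste di URL effettivi.
--     """
--     canonical_urls = {}
--
--     for link in links:
--         normalized = normalize_url_for_comparison(link)
--         if normalized not in canonical_urls:
--             canonical_urls[normalized] = []
--         canonical_urls[normalized].append(link)
--
--     # Filtra solo gli URL che hanno duplicati
--     duplicates = {k: v for k, v in canonical_urls.items() if len(v) > 1}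
--     return duplicates
-- ===== SOURCE B (Python) =====
-- def normalize_url_for_comparison(url):
--     url = url.lower()
--     if url.startswith('http://'):
--         url = url[7:]
--     elif url.startswith('https://'):
--         url = url[8:]
--     url = url.rstrip('/')
--     if '?' in url and not any(x in url for x in ['format=', 'download=', 'file=']):
--         url = url.split('?')[0]
--     return url
--
-- def find_duplicate_links(links):
--     # Two-pass count-then-collect: first count how many links share each
--     # normalized key, then collect only the links whose key occurs more than once.
--     counts = {}
--     for link in links:
--         k = normalize_url_for_comparison(link)
--         counts[k] = counts.get(k, 0) + 1
--     duplicates = {}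
--     for link in links:
--         k = normalize_url_for_comparison(link)
--         if counts[k] > 1:
--             duplicates.setdefault(k, []).append(link)
--     return duplicates
-- ===== Notes on version B (the rewrite author's own statement) =====
-- stated objective: alternative
-- what changed: Replaced A's group-everything-then-filter-the-dict (build lists for every key, then a dict comprehension dropping singletons) with a two-pass count-then-collect: a first pass counts occurrences per normalized key, a second pass appends a link to the result only when its key's count exceeds one, so singleton groups are never materialized and no filtering pass over the dict is needed.
import Mathlib
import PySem

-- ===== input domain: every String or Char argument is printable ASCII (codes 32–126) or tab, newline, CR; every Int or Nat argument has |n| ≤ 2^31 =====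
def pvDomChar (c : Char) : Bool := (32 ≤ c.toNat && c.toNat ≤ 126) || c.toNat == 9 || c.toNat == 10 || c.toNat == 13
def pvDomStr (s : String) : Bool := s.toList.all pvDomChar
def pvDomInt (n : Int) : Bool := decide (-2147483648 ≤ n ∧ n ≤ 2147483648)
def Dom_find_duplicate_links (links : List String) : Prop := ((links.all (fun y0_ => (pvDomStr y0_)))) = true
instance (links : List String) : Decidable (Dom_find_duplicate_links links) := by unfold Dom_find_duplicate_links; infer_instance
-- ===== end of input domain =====

-- B replaces A's group-everything-then-filter-the-dict with a two-pass count-then-collect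
-- over the same normalized keys (alternative decomposition, same asymptotic cost).


-- ===== PORT A =====
-- shared same-module helper, used verbatim by both A and B
def normalize_url_for_comparison (url : String) : String :=
  let url := PySem.Str.lower url
  let url :=
    if PySem.Str.startswith url "http://" then PySem.Str.slice url (some 7) none
    else if PySem.Str.startswith url "https://" then PySem.Str.slice url (some 8) none
    else url
  -- url.rstrip('/'): drop trailing '/' characters (exact, hand-ported: PySem has no chars-argument rstrip)
  let url := String.ofList ((url.toList.reverse.dropWhile (fun c => c == '/')).reverse)
  if PySem.Str.isIn "?" url
      && !(["format=", "download=", "file="].any (fun x => PySem.Str.isIn x url)) then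
    -- url.split('?')[0]: sep "?" ≠ "" and split never returns [], so the fallback arm is unreachable — exact
    match PySem.Str.split? url "?" with
    | some (p :: _) => p
    | _ => url
  else url

def find_duplicate_links (links : List String) : List (String × List String) :=
  let canonical_urls :=
    links.foldl
      (fun d link =>
        let n := normalize_url_for_comparison link
        let d := if d.contains n = false then d.insert n ([] : List String) else d
        d.insert n (d.getD n [] ++ [link]))
      PySem.Dict.empty
  -- {k: v for k, v in canonical_urls.items() if len(v) > 1}
  let duplicates :=
    canonical_urls.items.foldl
      (fun d kv => if kv.2.length > 1 then d.insert kv.1 kv.2 else d)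
      (PySem.Dict.empty : PySem.Dict String (List String))
  duplicates.items

-- ===== PORT B =====
def find_duplicate_links_alt (links : List String) : List (String × List String) :=
  let counts :=
    links.foldl
      (fun d link =>
        let k := normalize_url_for_comparison link
        d.insert k (d.getD k 0 + 1))
      (PySem.Dict.empty : PySem.Dict String Int)
  let duplicates :=
    links.foldl
      (fun d link =>
        let k := normalize_url_for_comparison link
        -- counts[k]: k was counted in the first pass, so it is always present — getD's default is never used
        if counts.getD k 0 > 1 then
          -- duplicates.setdefault(k, []).append(link)
          let d' := d.setdefault k ([] : List String)
          d'.insert k (d'.getD k [] ++ [link])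
        else d)
      (PySem.Dict.empty : PySem.Dict String (List String))
  duplicates.items

-- ===== PRECONDITION & SPEC =====
def Spec_find_duplicate_links (links : List String) (out : List (String × List String)) : Prop := out = find_duplicate_links_alt links
instance (links : List String) (out : List (String × List String)) : Decidable (Spec_find_duplicate_links links out) := by unfold Spec_find_duplicate_links; infer_instance

-- ===== CLAIM (what is proved, stated in full; the proofs are below) =====
def Claim_equal_find_duplicate_links : Prop := ∀ (links : List String), Dom_find_duplicate_links links → Spec_find_duplicate_links links (find_duplicate_links links)

-- ===== LEMMAS AND PROOFS =====

-- the group of links sharing normalized key k, and "k's group has a duplicate"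
def pvGrp (links : List String) (k : String) : List String :=
  links.filter (fun l => normalize_url_for_comparison l == k)
def pvBig (links : List String) (k : String) : Bool :=
  decide (1 < (pvGrp links k).length)

lemma stepA_eq (d : PySem.Dict String (List String)) (n l : String) :
    (let d' := if d.contains n = false then d.insert n ([] : List String) else d
     d'.insert n (d'.getD n [] ++ [l])) = d.modify n [] (· ++ [l]) := by
  by_cases h : d.contains n = false
  · simp only [h, if_pos, PySem.Dict.modify, PySem.Dict.getD_insert_self,
      PySem.Dict.insert_insert_self, PySem.Dict.getD_of_not_contains d [] h]
  · simp [h, PySem.Dict.modify]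

lemma stepB_eq (d : PySem.Dict String (List String)) (n l : String) :
    (let d' := d.setdefault n ([] : List String)
     d'.insert n (d'.getD n [] ++ [l])) = d.modify n [] (· ++ [l]) := by
  by_cases h : d.contains n = true
  · simp [PySem.Dict.setdefault_of_contains d [] h, PySem.Dict.modify]
  · rw [PySem.Dict.setdefault_of_not_contains d [] (by simpa using h)]
    simp only [PySem.Dict.modify, PySem.Dict.getD_insert_self, PySem.Dict.insert_insert_self,
      PySem.Dict.getD_of_not_contains d [] (by simpa using h)]

lemma canonical_items (links : List String) :
    (links.foldl (fun d link => d.modify (normalize_url_for_comparison link) [] (· ++ [link]))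
        PySem.Dict.empty).items
      = (PySem.Set.ofList (links.map normalize_url_for_comparison)).map
          (fun k => (k, pvGrp links k)) := by
  set d := links.foldl (fun d link => d.modify (normalize_url_for_comparison link) [] (· ++ [link]))
    PySem.Dict.empty with hd
  have hkeys : d.keys = PySem.Set.ofList (links.map normalize_url_for_comparison) := by
    rw [hd]
    have := PySem.Dict.keys_foldl_modify_key links normalize_url_for_comparison
      ([] : List String) (fun _ link => (· ++ [link])) PySem.Dict.empty
    simpa [PySem.Set.update_nil_left] using this
  have hpair : d = (links.map (fun l => (normalize_url_for_comparison l, l))).foldl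
      (fun d p => d.modify p.1 [] (· ++ [p.2])) PySem.Dict.empty := by
    rw [hd, List.foldl_map]
  have hget : ∀ k, d.getD k [] = pvGrp links k := by
    intro k
    rw [hpair, PySem.Dict.getD_foldl_modify_append]
    simp [pvGrp, List.filter_map, List.map_map, Function.comp_def]
  rw [PySem.Dict.items_eq_map_keys d (hkeys ▸ PySem.Set.nodup_ofList _) [], hkeys]
  exact List.map_congr_left (fun k _ => by rw [hget k])

lemma ofList_filter (xs : List String) (p : String → Bool) :
    PySem.Set.ofList (xs.filter p) = (PySem.Set.ofList xs).filter p := by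
  induction xs using List.reverseRecOn with
  | nil => simp [PySem.Set.ofList_nil]
  | append_singleton xs x ih =>
    rw [List.filter_append, PySem.Set.ofList_append_singleton, PySem.Set.add_eq_ite]
    by_cases hp : p x = true
    · simp only [List.filter_cons, hp, List.filter_nil, if_pos,
        PySem.Set.ofList_append_singleton, PySem.Set.add_eq_ite]
      by_cases hm : x ∈ PySem.Set.ofList xs
      · have : x ∈ PySem.Set.ofList (xs.filter p) := by
          rw [PySem.Set.mem_ofList] at hm ⊢
          exact List.mem_filter.mpr ⟨hm, hp⟩
        rw [if_pos hm, if_pos this, ih]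
      · have : x ∉ PySem.Set.ofList (xs.filter p) := by
          rw [PySem.Set.mem_ofList] at hm ⊢
          exact fun hc => hm (List.mem_filter.mp hc).1
        rw [if_neg hm, if_neg this, ih, List.filter_append]
        simp [hp]
    · simp only [List.filter_cons, hp, Bool.false_eq_true, if_false, List.filter_nil,
        List.append_nil]
      by_cases hm : x ∈ PySem.Set.ofList xs
      · rw [if_pos hm, ih]
      · rw [if_neg hm, ih, List.filter_append]
        simp [hp]

lemma A_closed (links : List String) :
    find_duplicate_links links
      = ((PySem.Set.ofList (links.map normalize_url_for_comparison)).filter (pvBig links)).map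
          (fun k => (k, pvGrp links k)) := by
  unfold find_duplicate_links
  have hstep : (fun (d : PySem.Dict String (List String)) link =>
      let n := normalize_url_for_comparison link
      let d := if d.contains n = false then d.insert n ([] : List String) else d
      d.insert n (d.getD n [] ++ [link]))
      = fun d link => d.modify (normalize_url_for_comparison link) [] (· ++ [link]) :=
    funext fun d => funext fun link => stepA_eq d (normalize_url_for_comparison link) link
  rw [hstep]
  dsimp only
  rw [canonical_items]
  have hif : (fun (d : PySem.Dict String (List String)) (kv : String × List String) =>
      if kv.2.length > 1 then d.insert kv.1 kv.2 else d)
      = fun d kv => if (fun kv : String × List String => decide (1 < kv.2.length)) kv = true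
          then d.insert kv.1 kv.2 else d := by
    funext d kv; simp
  rw [hif, ← List.foldl_filter]
  have hlist : ((PySem.Set.ofList (links.map normalize_url_for_comparison)).map
        (fun k => (k, pvGrp links k))).filter
        (fun kv : String × List String => decide (1 < kv.2.length))
      = ((PySem.Set.ofList (links.map normalize_url_for_comparison)).filter (pvBig links)).map
          (fun k => (k, pvGrp links k)) := by
    rw [List.filter_map]; rfl
  rw [hlist]
  rw [PySem.Dict.items_foldl_insert_fresh _ Prod.fst Prod.snd _ (fun a _ => by simp)
    (by
      have : (((PySem.Set.ofList (links.map normalize_url_for_comparison)).filter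
            (pvBig links)).map (fun k => (k, pvGrp links k))).map Prod.fst
          = (PySem.Set.ofList (links.map normalize_url_for_comparison)).filter (pvBig links) := by
        simp [List.map_map, Function.comp_def]
      rw [this]
      exact (PySem.Set.nodup_ofList _).filter _)]
  simp [Function.comp_def, PySem.Dict.empty]

lemma counts_getD (links : List String) (k : String) :
    (links.foldl (fun d link =>
        d.insert (normalize_url_for_comparison link)
          (d.getD (normalize_url_for_comparison link) 0 + 1))
        (PySem.Dict.empty : PySem.Dict String Int)).getD k 0
      = ((pvGrp links k).length : Int) := by
  have hpair : links.foldl (fun d link =>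
        d.insert (normalize_url_for_comparison link)
          (d.getD (normalize_url_for_comparison link) 0 + 1))
      (PySem.Dict.empty : PySem.Dict String Int)
      = (links.map normalize_url_for_comparison).foldl
          (fun d x => d.insert x (d.getD x 0 + 1)) PySem.Dict.empty := by
    rw [List.foldl_map]
  rw [hpair, PySem.Dict.getD_foldl_insert_add_one]
  rw [List.count_eq_countP, List.countP_map]
  simp [pvGrp, ← List.countP_eq_length_filter, Function.comp_def]

lemma B_closed (links : List String) :
    find_duplicate_links_alt links
      = (PySem.Set.ofList ((links.filter (fun l => pvBig links (normalize_url_for_comparison l))).map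
            normalize_url_for_comparison)).map
          (fun k => (k, pvGrp (links.filter (fun l => pvBig links (normalize_url_for_comparison l))) k)) := by
  unfold find_duplicate_links_alt
  dsimp only
  have hstep : (fun (d : PySem.Dict String (List String)) link =>
      if (links.foldl (fun d link =>
            d.insert (normalize_url_for_comparison link)
              (d.getD (normalize_url_for_comparison link) 0 + 1))
          (PySem.Dict.empty : PySem.Dict String Int)).getD
            (normalize_url_for_comparison link) 0 > 1 then
        let d' := d.setdefault (normalize_url_for_comparison link) ([] : List String)
        d'.insert (normalize_url_for_comparison link)
          (d'.getD (normalize_url_for_comparison link) [] ++ [link])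
      else d)
      = fun d link =>
          if (fun l => pvBig links (normalize_url_for_comparison l)) link = true then
            d.modify (normalize_url_for_comparison link) [] (· ++ [link])
          else d := by
    funext d link
    rw [counts_getD links (normalize_url_for_comparison link)]
    by_cases h : 1 < (pvGrp links (normalize_url_for_comparison link)).length
    · rw [if_pos (by exact_mod_cast h), if_pos (by simpa [pvBig] using h)]
      exact stepB_eq d (normalize_url_for_comparison link) link
    · rw [if_neg (by exact_mod_cast h), if_neg (by simpa [pvBig] using h)]
  rw [hstep, ← List.foldl_filter, canonical_items]

-- ===== VERDICT (by name: the statement is the Claim_ definition above) =====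
theorem find_duplicate_links_spec : Claim_equal_find_duplicate_links := by
  intro links _
  show find_duplicate_links links = find_duplicate_links_alt links
  rw [A_closed, B_closed]
  have hmapf : (links.filter (fun l => pvBig links (normalize_url_for_comparison l))).map
      normalize_url_for_comparison
      = (links.map normalize_url_for_comparison).filter (pvBig links) := by
    rw [List.filter_map]; rfl
  rw [hmapf, ofList_filter]
  apply List.map_congr_left
  intro k hk
  have hbig : pvBig links k = true := (List.mem_filter.mp hk).2
  congr 1
  show pvGrp links k = pvGrp _ k
  unfold pvGrp
  rw [List.filter_filter]
  apply List.filter_congr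
  intro l _
  by_cases h : normalize_url_for_comparison l = k
  · simp [h, hbig]
  · simp [h]
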